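-- pv_equiv track=rewrite | github.com/RasmusKoit/wordleSolverEE | wordle.py | foundWordsRemoverPlace
-- ===== SOURCE A (Python) =====
-- def checkLetter(letter, position, word):
--     if word[position] == letter:
--         return True
--     else:
--         return False
--
-- def foundWordsRemoverPlace(initialWords, guess):
--     new_set = set()
--     for word in initialWords:
--         for number in range(0, 5):
--             if number in guess:
--                 if checkLetter(guess[number], number, word):
--                     new_set.add(word)
--     for word in new_set.copy():
--         for number in range(0, 5):
--             if number in guess:
--                 if not checkLetter(guess[number], number, word):
--                     if word in new_set:
--                         new_set.remove(word)
--     return new_set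
-- ===== SOURCE B (Python) =====
-- def foundWordsRemoverPlace(initialWords, guess):
--     rel = [n for n in range(5) if n in guess]
--     if not rel:
--         return set()
--     return {word for word in initialWords
--             if all(word[n] == guess[n] for n in rel)}
-- ===== Notes on version B (the rewrite author's own statement) =====
-- stated objective: simpler
-- what changed: Replaces A's two-pass build-then-prune of a mutated set (add a word on any position match, then re-scan and remove on any mismatch) with a single direct filter: compute the relevant guessed positions once and keep exactly the words matching all of them.
import Mathlib
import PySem

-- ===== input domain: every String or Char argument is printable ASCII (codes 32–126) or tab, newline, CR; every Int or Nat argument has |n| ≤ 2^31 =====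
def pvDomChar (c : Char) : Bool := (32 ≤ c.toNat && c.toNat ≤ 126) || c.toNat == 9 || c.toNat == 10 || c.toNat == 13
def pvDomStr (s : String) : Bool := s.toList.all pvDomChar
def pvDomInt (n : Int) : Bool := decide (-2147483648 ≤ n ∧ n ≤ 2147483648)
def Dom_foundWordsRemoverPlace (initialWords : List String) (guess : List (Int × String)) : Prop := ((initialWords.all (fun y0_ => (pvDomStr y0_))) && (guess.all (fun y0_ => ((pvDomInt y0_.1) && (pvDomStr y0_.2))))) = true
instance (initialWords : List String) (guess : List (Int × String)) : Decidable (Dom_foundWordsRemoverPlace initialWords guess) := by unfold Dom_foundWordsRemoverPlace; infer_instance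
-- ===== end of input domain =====

-- B replaces A's two-pass build-then-prune of a mutated set with one direct filter over the
-- precomputed relevant positions (objective: simpler). Python A iterates a set copy in hash
-- order in its second pass; the resulting set does not depend on that order, and the port
-- iterates it in first-insertion order.

-- ===== PORT A =====
def checkLetter (letter : String) (position : Int) (word : String) : Bool :=
  -- word[position] is PySem.Str.pyGet?; 'none' is Python's IndexError, excluded by Pre_
  match PySem.Str.pyGet? word position with
  | some c => if String.ofList [c] == letter then true else false
  | none => false

def foundWordsRemoverPlace (initialWords : List String) (guess : List (Int × String)) : List String :=
  let s1 : PySem.Set String := initialWords.foldl (fun s word =>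
      (PySem.List.pyRange 0 5 1).foldl (fun s number =>
        match (PySem.Dict.mk guess).get? number with
        | some letter => if checkLetter letter number word then PySem.Set.add s word else s
        | none => s) s)
    PySem.Set.empty
  s1.foldl (fun s word =>
      (PySem.List.pyRange 0 5 1).foldl (fun s number =>
        match (PySem.Dict.mk guess).get? number with
        | some letter =>
            if ! checkLetter letter number word then
              if PySem.Set.contains s word then PySem.Set.discard s word else s
            else s
        | none => s) s)
    s1

-- ===== PORT B =====
def foundWordsRemoverPlace_alt (initialWords : List String) (guess : List (Int × String)) : List String :=
  let rel := (PySem.List.pyRange 0 5 1).filter (fun n => ((PySem.Dict.mk guess).get? n).isSome)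
  if rel = [] then PySem.Set.empty
  else PySem.Set.ofList (initialWords.filter (fun word =>
    rel.all (fun n =>
      match (PySem.Dict.mk guess).get? n with
      | some letter =>
          match PySem.Str.pyGet? word n with
          | some c => String.ofList [c] == letter
          | none => false     -- Python's IndexError, excluded by Pre_
      | none => true)))        -- unreachable: n ∈ rel means the key is present

-- ===== PRECONDITION & SPEC =====
-- Pre_ excludes exactly the inputs on which Python A raises IndexError: a word shorter than
-- some guessed position in 0..4.
def Pre_foundWordsRemoverPlace (initialWords : List String) (guess : List (Int × String)) : Prop :=
  ∀ word ∈ initialWords, ∀ n ∈ ([0, 1, 2, 3, 4] : List Int),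
    ((PySem.Dict.mk guess).get? n).isSome → n < (word.toList.length : Int)
instance (initialWords : List String) (guess : List (Int × String)) : Decidable (Pre_foundWordsRemoverPlace initialWords guess) := by unfold Pre_foundWordsRemoverPlace; infer_instance
def pvWitness_foundWordsRemoverPlace : List String × (List (Int × String)) :=
  (["abcde", "axcde", "abxde"], [(0, "a"), (2, "c")])
def Spec_foundWordsRemoverPlace (initialWords : List String) (guess : List (Int × String)) (out : List String) : Prop := out = foundWordsRemoverPlace_alt initialWords guess
instance (initialWords : List String) (guess : List (Int × String)) (out : List String) : Decidable (Spec_foundWordsRemoverPlace initialWords guess out) := by unfold Spec_foundWordsRemoverPlace; infer_instance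

-- ===== CLAIM (what is proved, stated in full; the proofs are below) =====
def Claim_equal_foundWordsRemoverPlace : Prop := ∀ (initialWords : List String) (guess : List (Int × String)), Dom_foundWordsRemoverPlace initialWords guess → Pre_foundWordsRemoverPlace initialWords guess → Spec_foundWordsRemoverPlace initialWords guess (foundWordsRemoverPlace initialWords guess)

-- ===== LEMMAS AND PROOFS =====

-- 'there is a guessed letter at position n and word matches it'
def pvMatchAt (guess : List (Int × String)) (word : String) (n : Int) : Bool :=
  match (PySem.Dict.mk guess).get? n with
  | some letter => checkLetter letter n word
  | none => false

-- 'there is a guessed letter at position n and word fails it'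
def pvFailAt (guess : List (Int × String)) (word : String) (n : Int) : Bool :=
  match (PySem.Dict.mk guess).get? n with
  | some letter => ! checkLetter letter n word
  | none => false

theorem pv_gd_eq (s : PySem.Set String) (w : String) :
    (if PySem.Set.contains s w then PySem.Set.discard s w else s) = PySem.Set.discard s w := by
  by_cases h : w ∈ s
  · simp [PySem.Set.contains, h]
  · simp [PySem.Set.contains, h, PySem.Set.discard]
    exact ((List.filter_eq_self).2 (fun y hy => by simp; rintro rfl; exact h hy)).symm

theorem pv_discard_discard (s : PySem.Set String) (w : String) :
    PySem.Set.discard (PySem.Set.discard s w) w = PySem.Set.discard s w := by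
  simp [PySem.Set.discard, List.filter_filter]

-- A's first inner loop over positions adds the word iff some guessed position matches
theorem pv_innerAdd (guess : List (Int × String)) (w : String) (ns : List Int)
    (s : PySem.Set String) :
    ns.foldl (fun s number =>
        match (PySem.Dict.mk guess).get? number with
        | some letter => if checkLetter letter number w then PySem.Set.add s w else s
        | none => s) s
      = if ns.any (pvMatchAt guess w) then PySem.Set.add s w else s := by
  induction ns generalizing s with
  | nil => simp
  | cons n ns ih =>
    have hstep : (fun (s : PySem.Set String) (number : Int) =>
        match (PySem.Dict.mk guess).get? number with
        | some letter => if checkLetter letter number w then PySem.Set.add s w else s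
        | none => s) s n = if pvMatchAt guess w n then PySem.Set.add s w else s := by
      unfold pvMatchAt
      cases hg : (PySem.Dict.mk guess).get? n <;> simp [hg]
    simp only [List.foldl_cons, List.any_cons, hstep]
    by_cases h : pvMatchAt guess w n = true
    · simp [h, ih]
    · simp [h, ih]

-- A's second inner loop over positions removes the word iff some guessed position fails
theorem pv_innerRemove (guess : List (Int × String)) (w : String) (ns : List Int)
    (s : PySem.Set String) :
    ns.foldl (fun s number =>
        match (PySem.Dict.mk guess).get? number with
        | some letter =>
            if ! checkLetter letter number w then
              if PySem.Set.contains s w then PySem.Set.discard s w else s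
            else s
        | none => s) s
      = if ns.any (pvFailAt guess w) then PySem.Set.discard s w else s := by
  induction ns generalizing s with
  | nil => simp
  | cons n ns ih =>
    have hstep : (match (PySem.Dict.mk guess).get? n with
        | some letter =>
            if ! checkLetter letter n w then
              if PySem.Set.contains s w then PySem.Set.discard s w else s
            else s
        | none => s) = if pvFailAt guess w n then PySem.Set.discard s w else s := by
      unfold pvFailAt
      cases (PySem.Dict.mk guess).get? n
      · simp
      · rw [pv_gd_eq]
    rw [List.foldl_cons, hstep]
    by_cases h : pvFailAt guess w n = true
    · rw [if_pos h, ih, List.any_cons, h]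
      simp [pv_discard_discard]
    · rw [if_neg h, ih, List.any_cons]
      simp at h
      simp [h]

-- A's prune pass over the set copy removes exactly the flagged elements
theorem pv_removeAll (F : String → Bool) (ws : List String) (s : List String) :
    ws.foldl (fun s w => if F w then PySem.Set.discard s w else s) s
      = s.filter (fun x => !(F x && ws.contains x)) := by
  induction ws generalizing s with
  | nil => simp
  | cons w ws ih =>
    rw [List.foldl_cons, ih]
    by_cases h : F w = true
    · rw [if_pos h]
      simp only [PySem.Set.discard, List.filter_filter]
      apply List.filter_congr
      intro x _
      by_cases hx : x = w
      · subst hx; simp [h]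
      · simp [hx]
    · rw [if_neg h]
      apply List.filter_congr
      intro x _
      by_cases hx : x = w
      · subst hx; simp at h; simp [h]
      · simp [hx]

theorem pv_filter_add (p : String → Bool) (s : List String) (w : String) :
    (PySem.Set.add s w).filter p
      = if p w then PySem.Set.add (s.filter p) w else s.filter p := by
  by_cases hw : p w = true
  · rw [if_pos hw]
    by_cases h : w ∈ s
    · have h2 : w ∈ s.filter p := List.mem_filter.2 ⟨h, hw⟩
      simp [PySem.Set.add, PySem.Set.contains, h, h2]
    · have h2 : w ∉ s.filter p := fun hm => h (List.mem_filter.1 hm).1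
      simp [PySem.Set.add, PySem.Set.contains, h, h2, hw]
  · rw [if_neg hw]
    by_cases h : w ∈ s <;> simp [PySem.Set.add, PySem.Set.contains, h, hw]

theorem pv_filter_ofList (p : String → Bool) (xs : List String) (s : List String) :
    (xs.foldl PySem.Set.add s).filter p = (xs.filter p).foldl PySem.Set.add (s.filter p) := by
  induction xs generalizing s with
  | nil => simp
  | cons x xs ih =>
    rw [List.foldl_cons, ih, pv_filter_add]
    by_cases h : p x = true <;> simp [h]

theorem pv_all_congr_mem {l : List Int} {f g : Int → Bool} (h : ∀ x ∈ l, f x = g x) :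
    l.all f = l.all g := by
  rw [List.all_eq_not_any_not, List.all_eq_not_any_not,
    PySem.List.any_congr_mem (f := fun a => !f a) (g := fun a => !g a)
      (fun x hx => by simp only [h x hx])]

-- 'matches some guessed position and fails none' = 'matches all guessed positions',
-- provided at least one position is guessed
theorem pv_point (g : List (Int × String)) (w : String) (ns : List Int)
    (h : ns.filter (fun n => ((PySem.Dict.mk g).get? n).isSome) ≠ []) :
    (!(ns.any (pvFailAt g w)) && ns.any (pvMatchAt g w))
      = (ns.filter (fun n => ((PySem.Dict.mk g).get? n).isSome)).all (fun n =>
          match (PySem.Dict.mk g).get? n with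
          | some letter =>
              match PySem.Str.pyGet? w n with
              | some c => String.ofList [c] == letter
              | none => false
          | none => true) := by
  have hany : ns.any (pvMatchAt g w)
      = (ns.filter (fun n => ((PySem.Dict.mk g).get? n).isSome)).any (pvMatchAt g w) := by
    rw [List.any_filter]
    exact (PySem.List.any_congr_mem (fun n _ => by
      unfold pvMatchAt; cases (PySem.Dict.mk g).get? n <;> simp)).symm
  have hfail : ns.any (pvFailAt g w)
      = (ns.filter (fun n => ((PySem.Dict.mk g).get? n).isSome)).any (fun n => ! pvMatchAt g w n) := by
    rw [List.any_filter]
    exact (PySem.List.any_congr_mem (fun n _ => by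
      unfold pvFailAt pvMatchAt; cases (PySem.Dict.mk g).get? n <;> simp)).symm
  rw [hany, hfail]
  set rel := ns.filter (fun n => ((PySem.Dict.mk g).get? n).isSome) with hrel
  have hall : (!rel.any fun n => !pvMatchAt g w n) = rel.all (pvMatchAt g w) := by
    rw [List.all_eq_not_any_not]
  rw [hall]
  have hcongr : rel.all (pvMatchAt g w) = rel.all (fun n =>
      match (PySem.Dict.mk g).get? n with
      | some letter =>
          match PySem.Str.pyGet? w n with
          | some c => String.ofList [c] == letter
          | none => false
      | none => true) := by
    apply pv_all_congr_mem
    intro n hn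
    have hk : ((PySem.Dict.mk g).get? n).isSome := by
      have := (List.mem_filter.1 (hrel ▸ hn)).2; simpa using this
    obtain ⟨letter, hg⟩ := Option.isSome_iff_exists.1 hk
    unfold pvMatchAt checkLetter
    cases PySem.Str.pyGet? w n <;> simp [hg, BEq.beq]
  rw [hcongr.symm]
  cases hrelc : rel with
  | nil => exact absurd hrelc h
  | cons r t =>
    by_cases ha : (r :: t).all (pvMatchAt g w) = true
    · have : (r :: t).any (pvMatchAt g w) = true := by
        simp only [List.all_cons, Bool.and_eq_true] at ha
        simp [ha.1]
      simp [ha, this]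
    · have ha' : (r :: t).all (pvMatchAt g w) = false := by simpa using ha
      simp [ha']

theorem pv_main (l : List String) (g : List (Int × String)) :
    foundWordsRemoverPlace l g = foundWordsRemoverPlace_alt l g := by
  have hR : PySem.List.pyRange 0 5 1 = ([0, 1, 2, 3, 4] : List Int) := by decide
  unfold foundWordsRemoverPlace foundWordsRemoverPlace_alt
  rw [hR]
  rw [PySem.List.foldl_congr_mem l _
        (fun s w => if (([0,1,2,3,4] : List Int).any (pvMatchAt g w)) then PySem.Set.add s w else s)
        PySem.Set.empty (fun acc x _ => pv_innerAdd g x [0,1,2,3,4] acc)]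
  rw [PySem.List.foldl_if_eq_foldl_filter (fun w => (([0,1,2,3,4] : List Int).any (pvMatchAt g w)))
        PySem.Set.add l PySem.Set.empty]
  show (List.foldl
      (fun s word =>
        List.foldl
          (fun s number =>
            match (PySem.Dict.mk g).get? number with
            | some letter =>
              if (! checkLetter letter number word) = true then
                if PySem.Set.contains s word = true then PySem.Set.discard s word else s
              else s
            | none => s)
          s [0, 1, 2, 3, 4])
      (List.foldl PySem.Set.add PySem.Set.empty (List.filter (fun w => ([0,1,2,3,4] : List Int).any (pvMatchAt g w)) l))
      (List.foldl PySem.Set.add PySem.Set.empty (List.filter (fun w => ([0,1,2,3,4] : List Int).any (pvMatchAt g w)) l))) = _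
  set s1 := List.foldl PySem.Set.add PySem.Set.empty (List.filter (fun w => ([0,1,2,3,4] : List Int).any (pvMatchAt g w)) l) with hs1
  rw [PySem.List.foldl_congr_mem s1 _
        (fun s w => if (([0,1,2,3,4] : List Int).any (pvFailAt g w)) then PySem.Set.discard s w else s)
        s1 (fun acc x _ => pv_innerRemove g x [0,1,2,3,4] acc)]
  rw [pv_removeAll]
  rw [List.filter_congr (fun x hx => show (!(([0,1,2,3,4] : List Int).any (pvFailAt g x) && List.contains s1 x))
        = (!([0,1,2,3,4] : List Int).any (pvFailAt g x)) from by
      simp [List.contains_eq_mem, hx])]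
  rw [hs1, pv_filter_ofList]
  rw [List.filter_filter]
  show List.foldl PySem.Set.add (List.filter (fun w => !([0,1,2,3,4] : List Int).any (pvFailAt g w)) PySem.Set.empty)
      (List.filter (fun a => (!([0,1,2,3,4] : List Int).any (pvFailAt g a)) && ([0,1,2,3,4] : List Int).any (pvMatchAt g a)) l) = _
  by_cases hrel : ([0,1,2,3,4] : List Int).filter (fun n => ((PySem.Dict.mk g).get? n).isSome) = []
  · show _ = (if _ = ([] : List Int) then _ else _)
    rw [if_pos hrel]
    have hkeys : ∀ n ∈ ([0,1,2,3,4] : List Int), ¬ ((PySem.Dict.mk g).get? n).isSome = true :=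
      List.filter_eq_nil_iff.1 hrel
    have hfilter : List.filter (fun a => (!([0,1,2,3,4] : List Int).any (pvFailAt g a)) && ([0,1,2,3,4] : List Int).any (pvMatchAt g a)) l = [] := by
      apply List.filter_eq_nil_iff.2
      intro w _
      have hm : ([0,1,2,3,4] : List Int).any (pvMatchAt g w) = false := by
        apply List.any_eq_false.2
        intro n hn
        have := hkeys n hn
        unfold pvMatchAt
        cases hg2 : (PySem.Dict.mk g).get? n
        · simp
        · exact absurd (by simp [hg2]) this
      simp [hm]
    rw [hfilter]
    rfl
  · show _ = (if _ = ([] : List Int) then _ else _)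
    rw [if_neg hrel]
    rw [List.filter_congr (fun w _ => pv_point g w [0,1,2,3,4] hrel)]
    rfl

-- ===== VERDICT (by name: the statement is the Claim_ definition above) =====
theorem foundWordsRemoverPlace_spec : Claim_equal_foundWordsRemoverPlace := by
  intro l g _ _
  unfold Spec_foundWordsRemoverPlace
  exact pv_main l g
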